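-- pv_equiv track=rewrite | github.com/doehyeonlee/chorus_detection | lyric_structure.py | pretty_print_tree
-- ===== SOURCE A (Python) =====
-- def pretty_print_tree(text_tree):
--     space_between = '    '
--     res = ''
--     output_separator = '\n'
--     block_index = 0
--     line_index = 0
--     for block in text_tree:
--         if not block:
--             continue
--         line_in_block_index = 0
--         for line in block:
--             line = line.strip()
--             if not line:
--                 continue
--             line_pretty = space_between + str(block_index) + '.' + str(line_in_block_index)\
--                           + space_between + str(line_index) + space_between + line + output_separator
--             res += line_pretty
--             line_in_block_index += 1
--             line_index += 1
--         block_index += 1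
--         res += output_separator
--     return space_between + res
-- ===== SOURCE B (Python) =====
-- def pretty_print_tree(text_tree):
--     # Build the output BACK-TO-FRONT: clean first, take totals, then walk the
--     # blocks and lines in reverse, decrementing the counters from the totals,
--     # and finally join the collected pieces reversed.
--     cleaned = [[s for s in (l.strip() for l in b) if s] for b in text_tree if b]
--     bi = len(cleaned)
--     gi = sum(len(c) for c in cleaned)
--     pieces = []
--     for kept in reversed(cleaned):
--         bi -= 1
--         gi -= len(kept)
--         pieces.append('\n')
--         li = len(kept)
--         for s in reversed(kept):
--             li -= 1
--             pieces.append('    %d.%d    %d    %s\n' % (bi, li, gi + li, s))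
--     pieces.append('    ')
--     return ''.join(reversed(pieces))
-- ===== Notes on version B (the rewrite author's own statement) =====
-- stated objective: alternative
-- what changed: B builds the output back-to-front: it first cleans the tree and computes the block count and total kept-line count, then traverses blocks and lines in REVERSE, decrementing the block/line counters from those totals instead of incrementing from zero, collecting pieces that are joined reversed, instead of A's forward pass with four incrementing mutable counters and string concatenation.
import Mathlib
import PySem

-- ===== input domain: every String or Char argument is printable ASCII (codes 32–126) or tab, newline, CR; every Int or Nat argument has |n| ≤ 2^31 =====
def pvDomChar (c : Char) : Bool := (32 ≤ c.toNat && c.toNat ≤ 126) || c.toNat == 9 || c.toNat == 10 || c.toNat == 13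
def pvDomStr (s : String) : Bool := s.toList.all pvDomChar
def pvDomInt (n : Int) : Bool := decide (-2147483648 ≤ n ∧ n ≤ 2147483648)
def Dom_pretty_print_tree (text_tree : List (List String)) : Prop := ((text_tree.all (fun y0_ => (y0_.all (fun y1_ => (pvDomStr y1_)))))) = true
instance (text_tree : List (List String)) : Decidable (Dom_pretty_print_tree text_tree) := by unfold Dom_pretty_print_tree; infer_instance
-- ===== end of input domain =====

-- B builds the output back-to-front: it cleans the tree, takes the totals, then
-- walks blocks and lines in reverse decrementing the counters, and joins the
-- collected pieces reversed; objective: alternative decomposition, same cost.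

-- ===== PORT A =====
def pretty_print_tree (text_tree : List (List String)) : String :=
  "    " ++ (text_tree.foldl (fun (st : String × Int × Int) block =>
    if block = [] then st
    else
      let st2 := block.foldl (fun (st2 : String × Int × Int) line =>
        let line := PySem.Str.strip line
        if line = "" then st2
        else (st2.1 ++ ("    " ++ PySem.Int.toStr st.2.1 ++ "." ++ PySem.Int.toStr st2.2.1
                ++ "    " ++ PySem.Int.toStr st2.2.2 ++ "    " ++ line ++ "\n"),
              st2.2.1 + 1, st2.2.2 + 1)) (st.1, (0 : Int), st.2.2)
      (st2.1 ++ "\n", st.2.1 + 1, st2.2.2)) ("", (0 : Int), (0 : Int))).1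

-- ===== PORT B =====
def pptFmt (bi li gi : Int) (ln : String) : String :=
  "    " ++ PySem.Int.toStr bi ++ "." ++ PySem.Int.toStr li ++ "    " ++ PySem.Int.toStr gi ++ "    " ++ ln ++ "\n"

def pretty_print_tree_alt (text_tree : List (List String)) : String :=
  let cleaned := (text_tree.filter (fun b => b != [])).map
      (fun b => (b.map PySem.Str.strip).filter (fun s => s != ""))
  let st := cleaned.reverse.foldl (fun (st : Int × Int × List String) kept =>
      let bi := st.1 - 1
      let gi := st.2.1 - (kept.length : Int)
      let pieces := st.2.2 ++ ["\n"]
      let st2 := kept.reverse.foldl (fun (q : Int × List String) s =>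
          (q.1 - 1, q.2 ++ [pptFmt bi (q.1 - 1) (gi + (q.1 - 1)) s]))
          ((kept.length : Int), pieces)
      (bi, gi, st2.2))
    ((cleaned.length : Int), ((cleaned.map List.length).sum : Int), ([] : List String))
  String.join (st.2.2 ++ ["    "]).reverse

-- ===== PRECONDITION & SPEC =====
def Spec_pretty_print_tree (text_tree : List (List String)) (out : String) : Prop := out = pretty_print_tree_alt text_tree
instance (text_tree : List (List String)) (out : String) : Decidable (Spec_pretty_print_tree text_tree out) := by unfold Spec_pretty_print_tree; infer_instance

-- ===== CLAIM (what is proved, stated in full; the proofs are below) =====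
def Claim_equal_pretty_print_tree : Prop := ∀ (text_tree : List (List String)), Dom_pretty_print_tree text_tree → Spec_pretty_print_tree text_tree (pretty_print_tree text_tree)

-- ===== LEMMAS AND PROOFS =====

/-- The cleaned tree both programs effectively work on. -/
def pptClean (text_tree : List (List String)) : List (List String) :=
  (text_tree.filter (fun b => b != [])).map
      (fun b => (b.map PySem.Str.strip).filter (fun s => s != ""))

/-- Canonical string of one cleaned block, from in-block index `lib`, global index `li`. -/
def pptS (bi lib li : Int) : List String → String
  | [] => ""
  | x :: rest => pptFmt bi lib li x ++ pptS bi (lib + 1) (li + 1) rest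

/-- Canonical string of the whole cleaned tree from block index `bi`, global index `li`. -/
def pptG (bi li : Int) : List (List String) → String
  | [] => ""
  | lines :: rest => pptS bi 0 li lines ++ "\n" ++ pptG (bi + 1) (li + (lines.length : Int)) rest

theorem pptJoin_foldl (l : List String) : ∀ x y : String,
    l.foldl (· ++ ·) (x ++ y) = x ++ l.foldl (· ++ ·) y := by
  induction l with
  | nil => intro x y; simp
  | cons a t ih =>
    intro x y
    simp only [List.foldl_cons]
    rw [String.append_assoc, ih]

theorem pptJoin_cons (a : String) (l : List String) : String.join (a :: l) = a ++ String.join l := by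
  simp only [String.join, List.foldl_cons]
  rw [show ("" ++ a : String) = a ++ "" by simp, pptJoin_foldl]

theorem pptA_inner (b : List String) : ∀ (res : String) (bi lib li : Int),
    b.foldl (fun (st2 : String × Int × Int) line =>
        let line := PySem.Str.strip line
        if line = "" then st2
        else (st2.1 ++ ("    " ++ PySem.Int.toStr bi ++ "." ++ PySem.Int.toStr st2.2.1
                ++ "    " ++ PySem.Int.toStr st2.2.2 ++ "    " ++ line ++ "\n"),
              st2.2.1 + 1, st2.2.2 + 1)) (res, lib, li)
      = (res ++ pptS bi lib li ((b.map PySem.Str.strip).filter (fun s => s != "")),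
         lib + (((b.map PySem.Str.strip).filter (fun s => s != "")).length : Int),
         li + (((b.map PySem.Str.strip).filter (fun s => s != "")).length : Int)) := by
  induction b with
  | nil => intro res bi lib li; simp [pptS]
  | cons l b ih =>
    intro res bi lib li
    simp only [List.foldl_cons, List.map_cons, List.filter_cons]
    by_cases h : PySem.Str.strip l = ""
    · simp only [h, bne_self_eq_false, Bool.false_eq_true, if_false]
      exact ih res bi lib li
    · have hb : (PySem.Str.strip l != "") = true := by simpa using h
      simp only [if_neg h, hb]
      rw [ih]
      refine Prod.ext ?_ (Prod.ext ?_ ?_) <;> simp [pptS, pptFmt, String.append_assoc]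
      · ring
      · ring

theorem pptA_outer (tt : List (List String)) : ∀ (res : String) (bi li : Int),
    tt.foldl (fun (st : String × Int × Int) block =>
      if block = [] then st
      else
        let st2 := block.foldl (fun (st2 : String × Int × Int) line =>
          let line := PySem.Str.strip line
          if line = "" then st2
          else (st2.1 ++ ("    " ++ PySem.Int.toStr st.2.1 ++ "." ++ PySem.Int.toStr st2.2.1
                  ++ "    " ++ PySem.Int.toStr st2.2.2 ++ "    " ++ line ++ "\n"),
                st2.2.1 + 1, st2.2.2 + 1)) (st.1, (0 : Int), st.2.2)
        (st2.1 ++ "\n", st.2.1 + 1, st2.2.2)) (res, bi, li)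
      = (res ++ pptG bi li (pptClean tt),
         bi + ((pptClean tt).length : Int),
         li + (((pptClean tt).map List.length).sum : Int)) := by
  induction tt with
  | nil => intro res bi li; simp [pptClean, pptG]
  | cons block tt ih =>
    intro res bi li
    simp only [List.foldl_cons]
    by_cases h : block = []
    · have hc : pptClean (block :: tt) = pptClean tt := by
        simp [pptClean, h]
      rw [hc, if_pos h]
      exact ih res bi li
    · have hb : (block != []) = true := by simpa using h
      have hc : pptClean (block :: tt)
          = ((block.map PySem.Str.strip).filter (fun s => s != "")) :: pptClean tt := by
        simp [pptClean, hb]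
      rw [if_neg h, hc, pptA_inner block res bi 0 li]
      simp only []
      rw [ih]
      refine Prod.ext ?_ (Prod.ext ?_ ?_) <;> simp [pptG, String.append_assoc]
      · ring
      · ring

/-- B's inner reverse fold: processing `l.reverse`, decrementing the counter from
    `li0 + l.length`, appends exactly the formats of `l` in reverse order. -/
theorem pptB_inner' (l : List String) : ∀ (bi gi li0 : Int) (pieces : List String),
    ∃ P : List String,
      l.reverse.foldl (fun (q : Int × List String) s =>
          (q.1 - 1, q.2 ++ [pptFmt bi (q.1 - 1) (gi + (q.1 - 1)) s]))
        (li0 + (l.length : Int), pieces)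
      = (li0, P)
      ∧ String.join P.reverse = pptS bi li0 (gi + li0) l ++ String.join pieces.reverse := by
  induction l with
  | nil =>
    intro bi gi li0 pieces
    exact ⟨pieces, by simp, by simp [pptS]⟩
  | cons a t ih =>
    intro bi gi li0 pieces
    have hsplit : (a :: t).reverse = t.reverse ++ [a] := by simp
    obtain ⟨P, hP, hjoin⟩ := ih bi gi (li0 + 1) pieces
    have hstart : li0 + ((a :: t).length : Int) = (li0 + 1) + (t.length : Int) := by
      simp; ring
    refine ⟨P ++ [pptFmt bi li0 (gi + li0) a], ?_, ?_⟩
    · rw [hsplit, List.foldl_append, hstart, hP]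
      simp
    · have : (P ++ [pptFmt bi li0 (gi + li0) a]).reverse
          = pptFmt bi li0 (gi + li0) a :: P.reverse := by simp
      rw [this, pptJoin_cons, hjoin,
          show gi + (li0 + 1) = gi + li0 + 1 by ring]
      simp [pptS, String.append_assoc]

/-- B's outer reverse fold. -/
theorem pptB_outer (C : List (List String)) : ∀ (bi0 gi0 : Int) (pieces : List String),
    ∃ P : List String,
      C.reverse.foldl (fun (st : Int × Int × List String) kept =>
          let bi := st.1 - 1
          let gi := st.2.1 - (kept.length : Int)
          let pieces := st.2.2 ++ ["\n"]
          let st2 := kept.reverse.foldl (fun (q : Int × List String) s =>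
              (q.1 - 1, q.2 ++ [pptFmt bi (q.1 - 1) (gi + (q.1 - 1)) s]))
              ((kept.length : Int), pieces)
          (bi, gi, st2.2))
        (bi0 + (C.length : Int), gi0 + ((C.map List.length).sum : Int), pieces)
      = (bi0, gi0, P)
      ∧ String.join P.reverse = pptG bi0 gi0 C ++ String.join pieces.reverse := by
  induction C with
  | nil =>
    intro bi0 gi0 pieces
    exact ⟨pieces, by simp, by simp [pptG]⟩
  | cons c rest ih =>
    intro bi0 gi0 pieces
    have hsplit : (c :: rest).reverse = rest.reverse ++ [c] := by simp
    obtain ⟨P, hP, hjoin⟩ := ih (bi0 + 1) (gi0 + (c.length : Int)) pieces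
    have hb : bi0 + ((c :: rest).length : Int) = (bi0 + 1) + (rest.length : Int) := by
      simp; ring
    have hg : gi0 + (((c :: rest).map List.length).sum : Int)
        = (gi0 + (c.length : Int)) + ((rest.map List.length).sum : Int) := by
      simp; ring
    obtain ⟨P2, hP2, hjoin2⟩ := pptB_inner' c bi0 gi0 0 (P ++ ["\n"])
    refine ⟨P2, ?_, ?_⟩
    · rw [hsplit, List.foldl_append, hb, hg, hP]
      have e1 : (bi0 + 1 : Int) - 1 = bi0 := by ring
      have e2 : (gi0 + (c.length : Int)) - (c.length : Int) = gi0 := by ring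
      simp only [List.foldl_cons, List.foldl_nil, e1, e2]
      rw [show ((0:Int) + (c.length : Int)) = (c.length : Int) by ring] at hP2
      rw [hP2]
    · have : (P ++ ["\n"]).reverse = "\n" :: P.reverse := by simp
      rw [hjoin2, this, pptJoin_cons, hjoin]
      simp [pptG, String.append_assoc]

-- ===== VERDICT (by name: the statement is the Claim_ definition above) =====
theorem pretty_print_tree_spec : Claim_equal_pretty_print_tree := by
  intro tt _
  unfold Spec_pretty_print_tree pretty_print_tree pretty_print_tree_alt
  rw [pptA_outer]
  simp only []
  rw [show ((tt.filter (fun b => b != [])).map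
      (fun b => (b.map PySem.Str.strip).filter (fun s => s != ""))) = pptClean tt from rfl]
  obtain ⟨P, hP, hjoin⟩ := pptB_outer (pptClean tt) 0 0 []
  rw [show ((pptClean tt).length : Int) = 0 + ((pptClean tt).length : Int) by ring,
      show (((pptClean tt).map List.length).sum : Int)
         = 0 + (((pptClean tt).map List.length).sum : Int) by ring, hP]
  simp only []
  have : (P ++ ["    "]).reverse = "    " :: P.reverse := by simp
  rw [this, pptJoin_cons, hjoin]
  simp [String.join]
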